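-- pv_equiv track=rewrite | github.com/Wieceslaw/itmo-discrete-math | frank_frish.py | unite_tops
-- ===== SOURCE A (Python) =====
-- def unite_tops(G, Q):
--     added = []
--     tops = []
--     def f(G, top, i):
--         for j in range(len(G)):
--             if j not in added and G[top][j] >= Q:
--                 added.append(j)
--                 tops[i].append(j)
--                 f(G, j, i)
--     for i in range(len(G)):
--         if i not in added:
--             tops.append([i])
--             added.append(i)
--             f(G, i, len(tops) - 1)
--     return tops
-- ===== SOURCE B (Python) =====
-- def unite_tops(G, Q):
--     n = len(G)
--     comp = [-1] * n          # component label per vertex, -1 = undiscovered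
--     order = []               # global discovery order (pre-order of the DFS)
--     c = 0
--     for i in range(n):
--         if comp[i] != -1:
--             continue
--         stack = [i]
--         while stack:
--             v = stack.pop()
--             if comp[v] != -1:
--                 continue
--             comp[v] = c
--             order.append(v)
--             for j in range(n - 1, -1, -1):
--                 if G[v][j] >= Q:
--                     stack.append(j)
--         c += 1
--     return [[v for v in order if comp[v] == k] for k in range(c)]
-- ===== Notes on version B (the rewrite author's own statement) =====
-- stated objective: faster
-- what changed: Replaces the recursive tops-appending DFS with list-membership rescans by an iterative label-array DFS: an explicit stack, a comp[] array of component labels (the 'j not in added' scan becomes an O(1) label test), a single flat discovery-order list, and one final group-by-label pass that rebuilds the components.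
-- outside the precondition, e.g. on unite_tops([[]], 1): A returns [[0]], B raises IndexError
import Mathlib
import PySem

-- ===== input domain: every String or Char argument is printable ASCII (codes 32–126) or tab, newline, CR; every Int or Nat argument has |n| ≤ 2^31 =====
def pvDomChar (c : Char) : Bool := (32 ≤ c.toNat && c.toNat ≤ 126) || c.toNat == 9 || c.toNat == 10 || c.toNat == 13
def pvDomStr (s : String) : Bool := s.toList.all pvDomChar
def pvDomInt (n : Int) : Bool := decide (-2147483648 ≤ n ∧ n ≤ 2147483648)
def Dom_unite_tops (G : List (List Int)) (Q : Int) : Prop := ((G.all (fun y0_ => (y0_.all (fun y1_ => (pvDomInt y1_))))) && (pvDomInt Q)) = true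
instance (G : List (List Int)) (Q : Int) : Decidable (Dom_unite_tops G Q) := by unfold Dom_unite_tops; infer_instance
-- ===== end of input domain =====

-- B replaces A's recursive DFS (which rescans `j not in added` over a list) by an iterative
-- label-array DFS plus one final group-by-label pass; same return value, measured faster.

-- ===== PORT A =====
-- G[i][j] for Nat indices; exact for the in-range accesses made under Pre_ (0 ≤ i,j < len(G) ≤ row length)
def pvGget (G : List (List Int)) (i j : Nat) : Int := (G.getD i []).getD j 0

-- the inner recursive function f of A: loop `for j in range(len(G))`, recursing into fresh neighbors;
-- `fu` is fuel for the recursive f-calls only (the f-recursion depth is at most len(G); the ports pass enough)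
def fA (G : List (List Int)) (Q : Int) : Nat → Nat → List Nat → List Nat × List Nat → List Nat × List Nat
  | 0, _, _, st => st
  | _+1, _, [], st => st
  | fu+1, top, j :: js, (added, cur) =>
    if j ∉ added ∧ Q ≤ pvGget G top j then
      fA G Q (fu+1) top js (fA G Q fu j (List.range G.length) (added ++ [j], cur ++ [j]))
    else
      fA G Q (fu+1) top js (added, cur)
  termination_by fu _ js _ => (fu, js.length)

-- A's outer loop; tops[i] with i = len(tops)-1 is always the component currently being built,
-- carried here as the second state component and appended to tops when f returns
def unite_tops (G : List (List Int)) (Q : Int) : List (List Int) :=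
  let n := G.length
  let r := (List.range n).foldl
    (fun (st : List Nat × List (List Nat)) i =>
      if i ∈ st.1 then st
      else
        let p := fA G Q n i (List.range n) (st.1 ++ [i], [i])
        (p.1, st.2 ++ [p.2]))
    ([], [])
  r.2.map (fun c => c.map (fun x => (x : Int)))

-- ===== PORT B =====
-- B's `while stack` loop over state (comp, order, c): pop v, skip it if already labeled,
-- else label it c, append it to the flat discovery order, and run the descending-range push
-- loop `for j in range(n-1,-1,-1): if G[v][j] >= Q: stack.append(j)` (stack top = list head);
-- fuel bounds the iterations
def loopC (G : List (List Int)) (Q : Int) : Nat → List Nat → List Int × List Nat × Int → List Int × List Nat × Int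
  | 0, _, st => st
  | _+1, [], st => st
  | fu+1, v :: s, (comp, order, c) =>
    if comp.getD v 0 ≠ -1 then loopC G Q fu s (comp, order, c)
    else loopC G Q fu
      ((List.range G.length).reverse.foldl (fun st j => if Q ≤ pvGget G v j then j :: st else st) s)
      (comp.set v c, order ++ [v], c)

-- comp = [-1]*n; for each unlabeled i run the stack loop, then c += 1;
-- finally [[v for v in order if comp[v] == k] for k in range(c)]
def unite_tops_alt (G : List (List Int)) (Q : Int) : List (List Int) :=
  let n := G.length
  let r := (List.range n).foldl
    (fun (st : List Int × List Nat × Int) i =>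
      if st.1.getD i 0 ≠ -1 then st
      else
        let p := loopC G Q (n * n + n + 1) [i] st
        (p.1, p.2.1, p.2.2 + 1))
    (List.replicate n (-1), [], 0)
  (List.range r.2.2.toNat).map (fun (k : Nat) =>
    (r.2.1.filter (fun v => r.1.getD v 0 == (k : Int))).map (fun x => (x : Int)))

-- ===== PRECONDITION & SPEC =====
-- Pre_ excludes ragged matrices (some row shorter than len(G)): there A normally raises
-- IndexError, and only returns when every out-of-range column happens to be masked by an
-- earlier visit ('j not in added' short-circuits), while B, which scans the whole row of
-- every visited vertex, itself raises IndexError on all such inputs.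
def Pre_unite_tops (G : List (List Int)) (Q : Int) : Prop := ∀ row ∈ G, G.length ≤ row.length
instance (G : List (List Int)) (Q : Int) : Decidable (Pre_unite_tops G Q) := by unfold Pre_unite_tops; infer_instance

def pvWitness_unite_tops : List (List Int) × Int := ([[2, 0, 1], [0, 2, 0], [1, 0, 2]], 1)

def Spec_unite_tops (G : List (List Int)) (Q : Int) (out : List (List Int)) : Prop := out = unite_tops_alt G Q
instance (G : List (List Int)) (Q : Int) (out : List (List Int)) : Decidable (Spec_unite_tops G Q out) := by unfold Spec_unite_tops; infer_instance

-- ===== CLAIM (what is proved, stated in full; the proofs are below) =====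
def Claim_equal_unite_tops : Prop := ∀ (G : List (List Int)) (Q : Int), Dom_unite_tops G Q → Pre_unite_tops G Q → Spec_unite_tops G Q (unite_tops G Q)

-- ===== LEMMAS AND PROOFS =====

-- proof-side model of a plain visited-list stack DFS, the bridge between A's recursion and B's labels
def loopB (G : List (List Int)) (Q : Int) : Nat → List Nat → List Nat × List Nat → List Nat × List Nat
  | 0, _, st => st
  | _+1, [], st => st
  | fu+1, v :: s, (visited, comp) =>
    if v ∈ visited then loopB G Q fu s (visited, comp)
    else loopB G Q fu ((List.range G.length).filter (fun j => decide (Q ≤ pvGget G v j)) ++ s)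
           (visited ++ [v], comp ++ [v])

def pvNbrs (G : List (List Int)) (Q : Int) (v : Nat) : List Nat :=
  (List.range G.length).filter (fun j => decide (Q ≤ pvGget G v j))

def pvLB (G : List (List Int)) (Q : Int) (s : List Nat) (st : List Nat × List Nat) : List Nat × List Nat :=
  loopB G Q (s.length + (G.length + 1) * (G.length + 1)) s st

-- first component label of j, -1 if unlabeled
def labI (tops : List (List Nat)) (j : Nat) : Int :=
  match tops.findIdx? (fun t => decide (j ∈ t)) with
  | none => -1
  | some k => (k : Int)

lemma pvLen_le (n : Nat) (l : List Nat) (h1 : l.Nodup) (h2 : ∀ x ∈ l, x < n) : l.length ≤ n := by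
  classical
  have : l.toFinset ⊆ Finset.range n := by
    intro x hx; simp only [List.mem_toFinset] at hx; simpa using h2 x hx
  have := Finset.card_le_card this
  simpa [List.toFinset_card_of_nodup h1] using this

lemma loopB_nil (G : List (List Int)) (Q : Int) (fu : Nat) (st : List Nat × List Nat) :
    loopB G Q fu [] st = st := by
  cases fu <;> rfl

lemma pvNbrs_len_le (G : List (List Int)) (Q : Int) (v : Nat) : (pvNbrs G Q v).length ≤ G.length := by
  simpa [pvNbrs] using (List.length_filter_le _ (List.range G.length))

lemma pvNbrs_lt (G : List (List Int)) (Q : Int) (v : Nat) : ∀ x ∈ pvNbrs G Q v, x < G.length := by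
  intro x hx
  have := List.mem_of_mem_filter hx
  simpa [List.mem_range] using this

lemma loopB_fuel (G : List (List Int)) (Q : Int) :
    ∀ (fu : Nat) (k : Nat) (s added cur : List Nat),
      added.Nodup → (∀ x ∈ added, x < G.length) → (∀ x ∈ s, x < G.length) →
      G.length ≤ added.length + k → s.length + k * (G.length + 1) ≤ fu →
      loopB G Q (fu + 1) s (added, cur) = loopB G Q fu s (added, cur) := by
  intro fu
  induction fu with
  | zero =>
    intro k s added cur _ _ _ _ hb
    have : s = [] := by cases s <;> simp_all
    subst this; rfl
  | succ fu ih =>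
    intro k s added cur h1 h2 h3 hk hb
    cases s with
    | nil => rfl
    | cons v s' =>
      by_cases hv : v ∈ added
      · simp only [loopB, if_pos hv]
        exact ih k s' added cur h1 h2 (fun x hx => h3 x (by simp [hx])) hk
          (by simp at hb ⊢; omega)
      · simp only [loopB, if_neg hv]
        have hvn : v < G.length := h3 v (by simp)
        have hnd : (added ++ [v]).Nodup := by
          simp [List.nodup_append, h1]
          intro a ha h; exact hv (h ▸ ha)
        have hlt : ∀ x ∈ added ++ [v], x < G.length := by
          intro x hx; rcases List.mem_append.1 hx with h | h
          · exact h2 x h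
          · simp at h; omega
        have hcard : (added ++ [v]).length ≤ G.length := pvLen_le _ _ hnd hlt
        have hk1 : 1 ≤ k := by simp at hcard; omega
        have hlen : (pvNbrs G Q v).length ≤ G.length := pvNbrs_len_le G Q v
        refine ih (k - 1) _ (added ++ [v]) (cur ++ [v]) hnd hlt ?_ ?_ ?_
        · intro x hx
          rcases List.mem_append.1 hx with h | h
          · exact pvNbrs_lt G Q v x (by simpa [pvNbrs] using h)
          · exact h3 x (by simp [h])
        · simp at hcard ⊢; omega
        · have hlen' : (List.filter (fun j => decide (Q ≤ pvGget G v j)) (List.range G.length)).length ≤ G.length := by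
            simpa [pvNbrs] using hlen
          have hmul : (k - 1) * (G.length + 1) + (G.length + 1) = k * (G.length + 1) := by
            nlinarith [Nat.sub_add_cancel hk1]
          simp at hb ⊢
          omega

lemma loopB_eq_of_ge (G : List (List Int)) (Q : Int) (k : Nat) (s added cur : List Nat)
    (h1 : added.Nodup) (h2 : ∀ x ∈ added, x < G.length) (h3 : ∀ x ∈ s, x < G.length)
    (hk : G.length ≤ added.length + k) :
    ∀ (fu₁ fu₂ : Nat), s.length + k * (G.length + 1) ≤ fu₁ → s.length + k * (G.length + 1) ≤ fu₂ →
      loopB G Q fu₁ s (added, cur) = loopB G Q fu₂ s (added, cur) := by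
  have step : ∀ (d fu : Nat), s.length + k * (G.length + 1) ≤ fu →
      loopB G Q (fu + d) s (added, cur) = loopB G Q fu s (added, cur) := by
    intro d
    induction d with
    | zero => intro fu _; rfl
    | succ d ih =>
      intro fu hfu
      have : fu + (d + 1) = (fu + d) + 1 := by omega
      rw [this, loopB_fuel G Q (fu + d) k s added cur h1 h2 h3 hk (by omega), ih fu hfu]
  intro fu₁ fu₂ hf1 hf2
  rcases Nat.le_total fu₁ fu₂ with h | h
  · obtain ⟨d, rfl⟩ := Nat.le.dest h
    rw [step d fu₁ hf1]
  · obtain ⟨d, rfl⟩ := Nat.le.dest h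
    rw [step d fu₂ hf2]

lemma fA_nil (G : List (List Int)) (Q : Int) (fu top : Nat) (st : List Nat × List Nat) :
    fA G Q fu top [] st = st := by
  cases fu <;> (cases st; simp [fA])

lemma fA_extend (G : List (List Int)) (Q : Int) :
    ∀ (fu : Nat) (js : List Nat) (top : Nat) (added cur : List Nat),
      (∀ x ∈ js, x < G.length) → added.Nodup → (∀ x ∈ added, x < G.length) →
      ∃ e, fA G Q fu top js (added, cur) = (added ++ e, cur ++ e) ∧
        (added ++ e).Nodup ∧ (∀ x ∈ added ++ e, x < G.length) := by
  intro fu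
  induction fu with
  | zero =>
    intro js top added cur _ h1 h2
    exact ⟨[], by simp [fA], by simpa using h1, by simpa using h2⟩
  | succ fu ihfu =>
    intro js
    induction js with
    | nil =>
      intro top added cur _ h1 h2
      exact ⟨[], by simp [fA_nil], by simpa using h1, by simpa using h2⟩
    | cons j js' ihjs =>
      intro top added cur hjs h1 h2
      by_cases hc : j ∉ added ∧ Q ≤ pvGget G top j
      · have hjn : j < G.length := hjs j (by simp)
        have hnd : (added ++ [j]).Nodup := by
          simp [List.nodup_append, h1]
          intro a ha h; exact hc.1 (h ▸ ha)
        have hlt : ∀ x ∈ added ++ [j], x < G.length := by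
          intro x hx; rcases List.mem_append.1 hx with h | h
          · exact h2 x h
          · simp at h; omega
        obtain ⟨e₁, he₁, hnd₁, hlt₁⟩ := ihfu (List.range G.length) j (added ++ [j]) (cur ++ [j])
          (by intro x hx; simpa [List.mem_range] using hx) hnd hlt
        obtain ⟨e₂, he₂, hnd₂, hlt₂⟩ := ihjs top (added ++ [j] ++ e₁) (cur ++ [j] ++ e₁)
          (fun x hx => hjs x (by simp [hx])) hnd₁ hlt₁
        refine ⟨[j] ++ e₁ ++ e₂, ?_, by simpa [List.append_assoc] using hnd₂,
          by intro x hx; exact hlt₂ x (by simpa [List.append_assoc] using hx)⟩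
        simp only [fA, if_pos hc, he₁, he₂]
        simp [List.append_assoc]
      · obtain ⟨e, he, hnd, hlt⟩ := ihjs top added cur (fun x hx => hjs x (by simp [hx])) h1 h2
        exact ⟨e, by simp only [fA, if_neg hc, he], hnd, hlt⟩

lemma pvLB_cons_mem (G : List (List Int)) (Q : Int) (v : Nat) (s added cur : List Nat)
    (hv : v ∈ added) : pvLB G Q (v :: s) (added, cur) = pvLB G Q s (added, cur) := by
  unfold pvLB
  have h : (v :: s).length + (G.length + 1) * (G.length + 1)
      = (s.length + (G.length + 1) * (G.length + 1)) + 1 := by simp; omega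
  rw [h]
  simp only [loopB, if_pos hv]

lemma pvLB_cons_new (G : List (List Int)) (Q : Int) (v : Nat) (s added cur : List Nat)
    (hv : v ∉ added) (hvn : v < G.length) (h1 : added.Nodup)
    (h2 : ∀ x ∈ added, x < G.length) (h3 : ∀ x ∈ s, x < G.length) :
    pvLB G Q (v :: s) (added, cur)
      = pvLB G Q (pvNbrs G Q v ++ s) (added ++ [v], cur ++ [v]) := by
  have h : (v :: s).length + (G.length + 1) * (G.length + 1)
      = (s.length + (G.length + 1) * (G.length + 1)) + 1 := by simp; omega
  conv_lhs => rw [pvLB, h]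
  simp only [loopB, if_neg hv]
  have hnd : (added ++ [v]).Nodup := by
    simp [List.nodup_append, h1]
    intro a ha h; exact hv (h ▸ ha)
  have hlt : ∀ x ∈ added ++ [v], x < G.length := by
    intro x hx; rcases List.mem_append.1 hx with h | h
    · exact h2 x h
    · simp at h; omega
  have hstk : ∀ x ∈ pvNbrs G Q v ++ s, x < G.length := by
    intro x hx; rcases List.mem_append.1 hx with h | h
    · exact pvNbrs_lt G Q v x h
    · exact h3 x h
  have hcard : (added ++ [v]).length ≤ G.length := pvLen_le _ _ hnd hlt
  have hnb : (pvNbrs G Q v).length ≤ G.length := pvNbrs_len_le G Q v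
  have hmul : (G.length - added.length - 1) * (G.length + 1) ≤ G.length * (G.length + 1) :=
    Nat.mul_le_mul_right _ (by omega)
  have hC : (G.length + 1) * (G.length + 1) = G.length * (G.length + 1) + (G.length + 1) := by ring
  have := loopB_eq_of_ge G Q (G.length - added.length - 1) (pvNbrs G Q v ++ s)
    (added ++ [v]) (cur ++ [v]) hnd hlt hstk (by simp at hcard ⊢; omega)
    (s.length + (G.length + 1) * (G.length + 1))
    ((pvNbrs G Q v ++ s).length + (G.length + 1) * (G.length + 1))
    (by simp at hcard ⊢; omega) (by simp; omega)
  simpa [pvNbrs, pvLB] using this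

lemma pvMain (G : List (List Int)) (Q : Int) :
    ∀ (k : Nat) (js s : List Nat) (top fu : Nat) (added cur : List Nat),
      added.Nodup → (∀ x ∈ added, x < G.length) → (∀ x ∈ js, x < G.length) →
      (∀ x ∈ s, x < G.length) →
      G.length ≤ added.length + k → k ≤ G.length + 1 → G.length + 1 ≤ added.length + fu →
      pvLB G Q (js.filter (fun j => decide (Q ≤ pvGget G top j)) ++ s) (added, cur)
        = pvLB G Q s (fA G Q fu top js (added, cur)) := by
  intro k
  induction k using Nat.strong_induction_on with
  | _ k ihk =>
    intro js
    induction js with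
    | nil =>
      intro s top fu added cur _ _ _ _ _ _ _
      simp [fA_nil]
    | cons j js' ihjs =>
      intro s top fu added cur h1 h2 hjs h3 hk hkn hfu
      have hlea : added.length ≤ G.length := pvLen_le _ _ h1 h2
      obtain ⟨fu', rfl⟩ : ∃ fu', fu = fu' + 1 := ⟨fu - 1, by omega⟩
      have hjn : j < G.length := hjs j (by simp)
      have hjs' : ∀ x ∈ js', x < G.length := fun x hx => hjs x (by simp [hx])
      by_cases hc : Q ≤ pvGget G top j
      · by_cases hm : j ∈ added
        · rw [show (j :: js').filter (fun j => decide (Q ≤ pvGget G top j))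
                = j :: js'.filter (fun j => decide (Q ≤ pvGget G top j)) by simp [hc]]
          rw [List.cons_append, pvLB_cons_mem G Q j _ added cur hm]
          rw [show fA G Q (fu' + 1) top (j :: js') (added, cur)
                = fA G Q (fu' + 1) top js' (added, cur) by
            simp only [fA]; rw [if_neg (by simp [hm])]]
          exact ihjs s top (fu' + 1) added cur h1 h2 hjs' h3 hk hkn hfu
        · have hnd : (added ++ [j]).Nodup := by
            simp [List.nodup_append, h1]
            intro a ha h; exact hm (h ▸ ha)
          have hlt : ∀ x ∈ added ++ [j], x < G.length := by
            intro x hx; rcases List.mem_append.1 hx with h | h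
            · exact h2 x h
            · simp at h; omega
          have hcard : (added ++ [j]).length ≤ G.length := pvLen_le _ _ hnd hlt
          have hk1 : 1 ≤ k := by simp at hcard; omega
          have hrest : ∀ x ∈ js'.filter (fun j => decide (Q ≤ pvGget G top j)) ++ s, x < G.length := by
            intro x hx; rcases List.mem_append.1 hx with h | h
            · exact hjs' x (List.mem_of_mem_filter h)
            · exact h3 x h
          rw [show (j :: js').filter (fun j => decide (Q ≤ pvGget G top j))
                = j :: js'.filter (fun j => decide (Q ≤ pvGget G top j)) by simp [hc]]
          rw [List.cons_append,
            pvLB_cons_new G Q j _ added cur hm hjn h1 h2 hrest]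
          have hmain := ihk (k - 1) (by omega) (List.range G.length)
            (js'.filter (fun j => decide (Q ≤ pvGget G top j)) ++ s) j fu'
            (added ++ [j]) (cur ++ [j]) hnd hlt
            (by intro x hx; simpa [List.mem_range] using hx) hrest
            (by simp at hcard ⊢; omega) (by omega) (by simp at hcard ⊢; omega)
          rw [show pvNbrs G Q j = (List.range G.length).filter (fun x => decide (Q ≤ pvGget G j x)) from rfl]
          rw [hmain]
          obtain ⟨e, he, hnd₁, hlt₁⟩ := fA_extend G Q fu' (List.range G.length) j
            (added ++ [j]) (cur ++ [j]) (by intro x hx; simpa [List.mem_range] using hx) hnd hlt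
          rw [show fA G Q (fu' + 1) top (j :: js') (added, cur)
                = fA G Q (fu' + 1) top js' (fA G Q fu' j (List.range G.length) (added ++ [j], cur ++ [j])) by
            simp only [fA]; rw [if_pos ⟨hm, hc⟩]]
          rw [he]
          exact ihjs s top (fu' + 1) (added ++ [j] ++ e) (cur ++ [j] ++ e) hnd₁ hlt₁ hjs' h3
            (by simp; omega) hkn
            (by simp; omega)
      · rw [show (j :: js').filter (fun j => decide (Q ≤ pvGget G top j))
              = js'.filter (fun j => decide (Q ≤ pvGget G top j)) by simp [hc]]
        rw [show fA G Q (fu' + 1) top (j :: js') (added, cur)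
              = fA G Q (fu' + 1) top js' (added, cur) by
          simp only [fA]; rw [if_neg (by simp [hc])]]
        exact ihjs s top (fu' + 1) added cur h1 h2 hjs' h3 hk hkn hfu

-- A's outer fold equals the visited-list stack-DFS outer fold
lemma pvOuter (G : List (List Int)) (Q : Int) :
    ∀ (l : List Nat) (added : List Nat) (tops : List (List Nat)),
      added.Nodup → (∀ x ∈ added, x < G.length) → (∀ x ∈ l, x < G.length) →
      l.foldl (fun (st : List Nat × List (List Nat)) i =>
          if i ∈ st.1 then st
          else
            let p := fA G Q G.length i (List.range G.length) (st.1 ++ [i], [i])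
            (p.1, st.2 ++ [p.2])) (added, tops)
        = l.foldl (fun (st : List Nat × List (List Nat)) i =>
          if i ∈ st.1 then st
          else
            let p := loopB G Q (G.length * G.length + G.length + 1) [i] (st.1, [])
            (p.1, st.2 ++ [p.2])) (added, tops) := by
  intro l
  induction l with
  | nil => intro added tops _ _ _; rfl
  | cons i l' ih =>
    intro added tops h1 h2 hl
    have hin : i < G.length := hl i (by simp)
    have hl' : ∀ x ∈ l', x < G.length := fun x hx => hl x (by simp [hx])
    by_cases hm : i ∈ added
    · simp only [List.foldl_cons, if_pos hm]
      exact ih added tops h1 h2 hl'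
    · have hnd : (added ++ [i]).Nodup := by
        simp [List.nodup_append, h1]
        intro a ha h; exact hm (h ▸ ha)
      have hlt : ∀ x ∈ added ++ [i], x < G.length := by
        intro x hx; rcases List.mem_append.1 hx with h | h
        · exact h2 x h
        · simp at h; omega
      have hcard : (added ++ [i]).length ≤ G.length := pvLen_le _ _ hnd hlt
      have hmul : (G.length - added.length) * (G.length + 1) ≤ G.length * (G.length + 1) :=
        Nat.mul_le_mul_right _ (by omega)
      have key : loopB G Q (G.length * G.length + G.length + 1) [i] (added, [])
          = fA G Q G.length i (List.range G.length) (added ++ [i], [i]) := by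
        have ha : loopB G Q (G.length * G.length + G.length + 1) [i] (added, [])
            = pvLB G Q [i] (added, []) := by
          exact loopB_eq_of_ge G Q (G.length - added.length) [i] added [] h1 h2
            (by intro x hx; simp at hx; omega) (by omega) _ _
            (by have hnn : G.length * (G.length + 1) = G.length * G.length + G.length := by ring
                simp; omega)
            (by have hnn : G.length * (G.length + 1) = G.length * G.length + G.length := by ring
                simp; omega)
        rw [ha, pvLB_cons_new G Q i [] added [] hm hin h1 h2 (by intro x hx; simp at hx)]
        have := pvMain G Q (G.length - added.length - 1) (List.range G.length) [] i G.length
          (added ++ [i]) ([] ++ [i]) hnd hlt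
          (by intro x hx; simpa [List.mem_range] using hx) (by intro x hx; simp at hx)
          (by simp only [List.length_append, List.length_cons, List.length_nil] at hcard ⊢; omega)
          (by omega)
          (by simp only [List.length_append, List.length_cons, List.length_nil]; omega)
        rw [show pvNbrs G Q i = (List.range G.length).filter (fun x => decide (Q ≤ pvGget G i x)) from rfl]
        rw [this, pvLB, loopB_nil]
        norm_num
      simp only [List.foldl_cons, if_neg hm]
      obtain ⟨e, he, hnd₁, hlt₁⟩ := fA_extend G Q G.length (List.range G.length) i
        (added ++ [i]) [i] (by intro x hx; simpa [List.mem_range] using hx) hnd hlt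
      simp only [key, he]
      exact ih (added ++ [i] ++ e) (tops ++ [[i] ++ e]) hnd₁ hlt₁ hl'

-- B's descending push loop = prepending the ascending filtered neighbor list
lemma pushLoop_eq (G : List (List Int)) (Q : Int) (v : Nat) (s : List Nat) :
    (List.range G.length).reverse.foldl (fun st j => if Q ≤ pvGget G v j then j :: st else st) s
      = (List.range G.length).filter (fun j => decide (Q ≤ pvGget G v j)) ++ s := by
  have key : ∀ (l : List Nat) (s : List Nat),
      l.reverse.foldl (fun st j => if Q ≤ pvGget G v j then j :: st else st) s
        = l.filter (fun j => decide (Q ≤ pvGget G v j)) ++ s := by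
    intro l
    induction l with
    | nil => intro s; rfl
    | cons a l ih =>
      intro s
      rw [List.reverse_cons, List.foldl_append]
      by_cases h : Q ≤ pvGget G v a
      · simp [ih, h]
      · simp [ih, h]
  exact key _ s

lemma pvSetGetD (l : List Int) (v : Nat) (c : Int) (j : Nat) :
    (l.set v c).getD j 0 = if v = j ∧ v < l.length then c else l.getD j 0 := by
  simp only [List.getD_eq_getElem?_getD, List.getElem?_set]
  rcases eq_or_ne v j with rfl | hne
  · by_cases hvl : v < l.length
    · simp [hvl]
    · simp [hvl, List.getElem?_eq_none (show l.length ≤ v by omega)]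
  · simp [hne, fun h : v = j ∧ v < l.length => hne h.1]

lemma labI_neg (tops : List (List Nat)) (j : Nat) :
    labI tops j = -1 ↔ j ∉ tops.flatten := by
  unfold labI
  cases h : tops.findIdx? (fun t => decide (j ∈ t)) with
  | none =>
    simp only [List.findIdx?_eq_none_iff] at h
    have hj : j ∉ tops.flatten := by
      simp only [List.mem_flatten]
      rintro ⟨t, ht, hjt⟩
      have := h t ht
      simp [hjt] at this
    simp [hj]
  | some k =>
    have hk : k < tops.length := (List.findIdx?_eq_some_iff_findIdx_eq.mp h).1
    have h2 := List.of_findIdx?_eq_some h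
    rw [List.getElem?_eq_getElem hk] at h2
    have hj : j ∈ tops[k] := by simpa using h2
    have hmem : j ∈ tops.flatten := List.mem_flatten.mpr ⟨tops[k], List.getElem_mem hk, hj⟩
    show (k : Int) = -1 ↔ j ∉ tops.flatten
    constructor
    · intro hc; exact absurd hc (by omega)
    · intro hjn; exact absurd hmem hjn

lemma labI_append_notmem (tops : List (List Nat)) (e : List Nat) (j : Nat) (hj : j ∉ e) :
    labI (tops ++ [e]) j = labI tops j := by
  unfold labI
  rw [List.findIdx?_append]
  cases h : tops.findIdx? (fun t => decide (j ∈ t)) with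
  | none => simp [hj]
  | some k => simp

lemma labI_append_mem (tops : List (List Nat)) (e : List Nat) (j : Nat)
    (hj : j ∉ tops.flatten) (hje : j ∈ e) :
    labI (tops ++ [e]) j = (tops.length : Int) := by
  unfold labI
  rw [List.findIdx?_append]
  have hnone : tops.findIdx? (fun t => decide (j ∈ t)) = none := by
    rw [List.findIdx?_eq_none_iff]
    intro t ht
    simp only [decide_eq_false_iff_not]
    intro hjt
    exact hj (List.mem_flatten.mpr ⟨t, ht, hjt⟩)
  simp [hnone, hje]

-- each element of component m has label m, given globally distinct elements
lemma labI_at : ∀ (tops : List (List Nat)), tops.flatten.Nodup →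
    ∀ (m : Nat) (l : List Nat), tops[m]? = some l → ∀ x ∈ l, labI tops x = (m : Int) := by
  intro tops
  induction tops with
  | nil => intro _ m l h; simp at h
  | cons t ts ih =>
    intro hnd m l h x hx
    rw [List.flatten_cons, List.nodup_append] at hnd
    cases m with
    | zero =>
      simp only [List.getElem?_cons_zero, Option.some.injEq] at h
      subst h
      unfold labI
      rw [List.findIdx?_cons]
      simp [hx]
    | succ m =>
      simp only [List.getElem?_cons_succ] at h
      have hxf : x ∈ ts.flatten := List.mem_flatten.mpr ⟨l, List.mem_of_getElem? h, hx⟩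
      have hxt : x ∉ t := fun hxt => hnd.2.2 x hxt x hxf rfl
      have hrec := ih hnd.2.1 m l h x hx
      unfold labI at hrec ⊢
      rw [List.findIdx?_cons]
      cases hfi : ts.findIdx? (fun t' => decide (x ∈ t')) with
      | none =>
        rw [hfi] at hrec
        have hrec' : (-1 : Int) = (m : Int) := hrec
        exact absurd hrec' (by omega)
      | some k =>
        rw [hfi] at hrec
        have hrec' : (k : Int) = (m : Int) := hrec
        have hkm : k = m := by exact_mod_cast hrec'
        subst hkm
        rw [if_neg (by simp [hxt])]
        rfl

-- group-by-label over the flat order rebuilds the component lists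
lemma groupLemma :
    ∀ (tops : List (List Nat)) (f : Nat → Int),
      (∀ (m : Nat) (l : List Nat), tops[m]? = some l → ∀ x ∈ l, f x = (m : Int)) →
      (List.range tops.length).map
          (fun (k : Nat) => tops.flatten.filter (fun v => f v == (k : Int))) = tops := by
  intro tops
  induction tops with
  | nil => intro f _; simp
  | cons t ts ih =>
    intro f hf
    have h0 : ∀ x ∈ t, f x = 0 := by
      intro x hx
      simpa using hf 0 t rfl x hx
    have hs : ∀ (m : Nat) (l : List Nat), ts[m]? = some l → ∀ x ∈ l, f x = (m : Int) + 1 := by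
      intro m l h x hx
      have := hf (m + 1) l (by simpa using h) x hx
      push_cast at this ⊢
      linarith
    have hflat : ∀ x ∈ ts.flatten, ∃ m : Nat, f x = (m : Int) + 1 := by
      intro x hx
      obtain ⟨l, hl, hxl⟩ := List.mem_flatten.mp hx
      obtain ⟨m, hm, rfl⟩ := List.mem_iff_getElem.mp hl
      exact ⟨m, hs m _ (List.getElem?_eq_getElem hm) x hxl⟩
    rw [List.length_cons, List.range_succ_eq_map, List.map_cons]
    congr 1
    · rw [List.flatten_cons, List.filter_append]
      have h1 : t.filter (fun v => f v == ((0 : Nat) : Int)) = t := by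
        apply List.filter_eq_self.mpr
        intro x hx
        simp [h0 x hx]
      have h2 : ts.flatten.filter (fun v => f v == ((0 : Nat) : Int)) = [] := by
        apply List.filter_eq_nil_iff.mpr
        intro x hx
        obtain ⟨m, hm⟩ := hflat x hx
        simp [hm]
        omega
      rw [h1, h2, List.append_nil]
    · rw [List.map_map]
      have ihh := ih (fun v => f v - 1) (by
        intro m l h x hx
        have h2 := hs m l h x hx
        show f x - 1 = (m : Int)
        omega)
      refine Eq.trans (List.map_congr_left ?_) ihh
      intro k hk
      show (t :: ts).flatten.filter (fun v => f v == ((Nat.succ k : Nat) : Int))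
          = ts.flatten.filter (fun v => f v - 1 == ((k : Nat) : Int))
      rw [List.flatten_cons, List.filter_append]
      have h1 : t.filter (fun v => f v == ((Nat.succ k : Nat) : Int)) = [] := by
        apply List.filter_eq_nil_iff.mpr
        intro x hx
        have := h0 x hx
        simp [this]
        omega
      rw [h1, List.nil_append]
      apply List.filter_congr
      intro x hx
      obtain ⟨m, hm⟩ := hflat x hx
      rw [hm]
      rcases eq_or_ne m k with rfl | hne
      · simp
      · have ha : ((m : Int) + 1) ≠ ((Nat.succ k : Nat) : Int) := by push_cast; omega
        have hb : ((m : Int) + 1 - 1) ≠ ((k : Nat) : Int) := by push_cast; omega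
        simp [ha, hb]

-- lockstep simulation: the visited-list DFS loop and B's label-array loop
lemma innerSim (G : List (List Int)) (Q : Int) :
    ∀ (fu : Nat) (s visited cur : List Nat) (comp : List Int) (order : List Nat) (c : Int),
      comp.length = G.length → visited.Nodup → (∀ x ∈ visited, x < G.length) →
      (∀ x ∈ s, x < G.length) → 0 ≤ c →
      (∀ j, j < G.length → (comp.getD j 0 = -1 ↔ j ∉ visited)) →
      ∃ e comp',
        loopB G Q fu s (visited, cur) = (visited ++ e, cur ++ e) ∧
        loopC G Q fu s (comp, order, c) = (comp', order ++ e, c) ∧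
        comp'.length = comp.length ∧
        (∀ j : Nat, comp'.getD j 0 = if j ∈ e then c else comp.getD j 0) ∧
        (visited ++ e).Nodup ∧ (∀ x ∈ e, x < G.length) := by
  intro fu
  induction fu with
  | zero =>
    intro s visited cur comp order c h1 h2 h3 h4 h5 h6
    exact ⟨[], comp, by simp [loopB], by simp [loopC], rfl, by simp, by simpa using h2, by simp⟩
  | succ fu ih =>
    intro s visited cur comp order c h1 h2 h3 h4 h5 h6
    cases s with
    | nil =>
      exact ⟨[], comp, by simp [loopB], by simp [loopC], rfl, by simp, by simpa using h2, by simp⟩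
    | cons v s' =>
      have hv : v < G.length := h4 v (by simp)
      have hs' : ∀ x ∈ s', x < G.length := fun x hx => h4 x (by simp [hx])
      by_cases hm : v ∈ visited
      · have hcgd : comp.getD v 0 ≠ -1 := by
          intro h; exact ((h6 v hv).mp h) hm
        obtain ⟨e, comp', k1, k2, k3, k4, k5, k6⟩ := ih s' visited cur comp order c h1 h2 h3 hs' h5 h6
        refine ⟨e, comp', ?_, ?_, k3, k4, k5, k6⟩
        · simp only [loopB]
          rw [if_pos hm]
          exact k1
        · simp only [loopC]
          rw [if_pos hcgd]
          exact k2
      · have hcgd : comp.getD v 0 = -1 := (h6 v hv).mpr hm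
        have hnd : (visited ++ [v]).Nodup := by
          simp [List.nodup_append, h2]
          intro a ha h; exact hm (h ▸ ha)
        have hlt : ∀ x ∈ visited ++ [v], x < G.length := by
          intro x hx; rcases List.mem_append.1 hx with h | h
          · exact h3 x h
          · simp at h; omega
        have hstk : ∀ x ∈ (List.range G.length).filter (fun j => decide (Q ≤ pvGget G v j)) ++ s',
            x < G.length := by
          intro x hx; rcases List.mem_append.1 hx with h | h
          · have := List.mem_of_mem_filter h; simpa [List.mem_range] using this
          · exact hs' x h
        have hlen : (comp.set v c).length = G.length := by simp [h1]
        have hiff : ∀ j, j < G.length → ((comp.set v c).getD j 0 = -1 ↔ j ∉ visited ++ [v]) := by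
          intro j hj
          rw [pvSetGetD]
          rcases eq_or_ne v j with rfl | hne
          · rw [if_pos ⟨rfl, by omega⟩]
            simp only [List.mem_append, List.mem_singleton, or_true, not_true_eq_false, iff_false]
            omega
          · rw [if_neg (fun hc => hne hc.1), h6 j hj]
            simp [List.mem_append, Ne.symm hne]
        obtain ⟨e₁, comp', k1, k2, k3, k4, k5, k6⟩ :=
          ih ((List.range G.length).filter (fun j => decide (Q ≤ pvGget G v j)) ++ s')
            (visited ++ [v]) (cur ++ [v]) (comp.set v c) (order ++ [v]) c hlen hnd hlt hstk h5 hiff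
        refine ⟨v :: e₁, comp', ?_, ?_, by simpa [h1] using k3, ?_, ?_, ?_⟩
        · simp only [loopB]
          rw [if_neg hm, k1]
          simp
        · simp only [loopC]
          rw [if_neg (not_not_intro hcgd), pushLoop_eq, k2]
          simp
        · intro j
          rw [k4 j, pvSetGetD]
          rcases eq_or_ne j v with rfl | hne
          · have hvl : j < comp.length := by omega
            by_cases hje : j ∈ e₁
            · simp [hje, hvl]
            · simp [hje, hvl]
          · by_cases hje : j ∈ e₁
            · simp [hje, hne]
            · simp [hje, hne, Ne.symm hne]
        · simpa [List.append_assoc] using k5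
        · intro x hx
          rcases List.mem_cons.mp hx with rfl | hx
          · exact hv
          · exact k6 x hx

-- outer fold simulation: the visited-list fold and B's (comp, order, c) fold
lemma outerSim (G : List (List Int)) (Q : Int) :
    ∀ (l : List Nat) (comp : List Int) (visited : List Nat) (tops : List (List Nat)),
      comp.length = G.length →
      visited = tops.flatten → visited.Nodup → (∀ x ∈ visited, x < G.length) →
      (∀ x ∈ l, x < G.length) →
      (∀ j, j < G.length → comp.getD j 0 = labI tops j) →
      ∃ (comp' : List Int) (tops' : List (List Nat)),
        l.foldl (fun (st : List Nat × List (List Nat)) i =>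
            if i ∈ st.1 then st
            else
              let p := loopB G Q (G.length * G.length + G.length + 1) [i] (st.1, [])
              (p.1, st.2 ++ [p.2])) (visited, tops) = (tops'.flatten, tops') ∧
        l.foldl (fun (st : List Int × List Nat × Int) i =>
            if st.1.getD i 0 ≠ -1 then st
            else
              let p := loopC G Q (G.length * G.length + G.length + 1) [i] st
              (p.1, p.2.1, p.2.2 + 1)) (comp, visited, (tops.length : Int))
          = (comp', tops'.flatten, (tops'.length : Int)) ∧
        tops'.flatten.Nodup ∧ (∀ x ∈ tops'.flatten, x < G.length) ∧
        (∀ j, j < G.length → comp'.getD j 0 = labI tops' j) := by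
  intro l
  induction l with
  | nil =>
    intro comp visited tops h1 h2 h3 h4 _ h6
    exact ⟨comp, tops, by simp [h2], by simp [h2], h2 ▸ h3, h2 ▸ h4, h6⟩
  | cons i l' ih =>
    intro comp visited tops h1 h2 h3 h4 hl h6
    have hin : i < G.length := hl i (by simp)
    have hl' : ∀ x ∈ l', x < G.length := fun x hx => hl x (by simp [hx])
    by_cases hm : i ∈ visited
    · have hlab : comp.getD i 0 ≠ -1 := by
        rw [h6 i hin]
        intro h
        exact (labI_neg tops i).mp h (h2 ▸ hm)
      obtain ⟨comp', tops', k1, k2, k3, k4, k5⟩ := ih comp visited tops h1 h2 h3 h4 hl' h6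
      refine ⟨comp', tops', ?_, ?_, k3, k4, k5⟩
      · simp only [List.foldl_cons]
        rw [if_pos hm]
        exact k1
      · simp only [List.foldl_cons]
        rw [if_pos hlab]
        exact k2
    · have hlab : comp.getD i 0 = -1 := by
        rw [h6 i hin]
        exact (labI_neg tops i).mpr (h2 ▸ hm)
      have hiff : ∀ j, j < G.length → (comp.getD j 0 = -1 ↔ j ∉ visited) := by
        intro j hj
        rw [h6 j hj, labI_neg, h2]
      obtain ⟨e, comp₁, k1, k2, k3, k4, k5, k6⟩ :=
        innerSim G Q (G.length * G.length + G.length + 1) [i] visited [] comp visited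
          (tops.length : Int) h1 h3 h4 (by intro x hx; simp at hx; omega)
          (Int.natCast_nonneg _) hiff
      have hflat : visited ++ e = (tops ++ [e]).flatten := by
        simp [h2]
      have hlab' : ∀ j, j < G.length → comp₁.getD j 0 = labI (tops ++ [e]) j := by
        intro j hj
        rw [k4 j]
        by_cases hje : j ∈ e
        · have hjt : j ∉ tops.flatten := by
            intro hjf
            have hjv : j ∈ visited := h2 ▸ hjf
            have hdis := (List.nodup_append.mp k5).2.2
            exact hdis j hjv j hje rfl
          rw [labI_append_mem tops e j hjt hje]
          simp [hje]
        · rw [labI_append_notmem tops e j hje, if_neg hje, h6 j hj]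
      have hbnd : ∀ x ∈ visited ++ e, x < G.length := by
        intro x hx; rcases List.mem_append.1 hx with h | h
        · exact h4 x h
        · exact k6 x h
      obtain ⟨comp', tops', m1, m2, m3, m4, m5⟩ :=
        ih comp₁ (visited ++ e) (tops ++ [e]) (by rw [k3, h1]) hflat k5 hbnd hl' hlab'
      refine ⟨comp', tops', ?_, ?_, m3, m4, m5⟩
      · simp only [List.foldl_cons]
        rw [if_neg hm]
        simp only [k1]
        simpa using m1
      · simp only [List.foldl_cons]
        rw [if_neg (not_not_intro hlab)]
        simp only [k2]
        have hc : (tops.length : Int) + 1 = (((tops ++ [e]).length : Nat) : Int) := by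
          push_cast; simp
        rw [hc]
        exact m2

-- ===== VERDICT =====
theorem unite_tops_spec : Claim_equal_unite_tops := by
  intro G Q _ _
  unfold Spec_unite_tops
  have hA : unite_tops G Q = (((List.range G.length).foldl
      (fun (st : List Nat × List (List Nat)) i =>
        if i ∈ st.1 then st
        else
          let p := fA G Q G.length i (List.range G.length) (st.1 ++ [i], [i])
          (p.1, st.2 ++ [p.2])) ([], [])).2).map (fun c => c.map (fun x => (x : Int))) := rfl
  have hB : unite_tops_alt G Q =
      (let r := (List.range G.length).foldl
        (fun (st : List Int × List Nat × Int) i =>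
          if st.1.getD i 0 ≠ -1 then st
          else
            let p := loopC G Q (G.length * G.length + G.length + 1) [i] st
            (p.1, p.2.1, p.2.2 + 1)) (List.replicate G.length (-1), [], 0)
      (List.range r.2.2.toNat).map (fun (k : Nat) =>
        (r.2.1.filter (fun v => r.1.getD v 0 == (k : Int))).map (fun x => (x : Int)))) := rfl
  rw [hA, hB, pvOuter G Q (List.range G.length) [] [] (by simp) (by simp)
    (by intro x hx; simpa [List.mem_range] using hx)]
  obtain ⟨comp', tops', k1, k2, k3, k4, k5⟩ :=
    outerSim G Q (List.range G.length) (List.replicate G.length (-1)) [] []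
      (by simp) (by simp) (by simp) (by simp)
      (by intro x hx; simpa [List.mem_range] using hx)
      (by
        intro j hj
        rw [List.getD_eq_getElem?_getD, List.getElem?_replicate]
        simp [hj, labI])
  simp only [List.length_nil, Nat.cast_zero] at k2
  rw [k1, k2]
  simp only [Int.toNat_natCast]
  have hgrp := groupLemma tops' (fun v => comp'.getD v 0) (by
    intro m l h x hx
    have hxf : x ∈ tops'.flatten := List.mem_flatten.mpr ⟨l, List.mem_of_getElem? h, hx⟩
    show comp'.getD x 0 = (m : Int)
    rw [k5 x (k4 x hxf)]
    exact labI_at tops' k3 m l h x hx)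
  calc tops'.map (fun c => c.map (fun x => (x : Int)))
      = ((List.range tops'.length).map
          (fun (k : Nat) => tops'.flatten.filter (fun v => comp'.getD v 0 == (k : Int)))).map
          (fun c => c.map (fun x => (x : Int))) := by rw [hgrp]
    _ = (List.range tops'.length).map
          (fun (k : Nat) => (tops'.flatten.filter (fun v => comp'.getD v 0 == (k : Int))).map
            (fun x => (x : Int))) := by
        rw [List.map_map]
        exact List.map_congr_left (fun a _ => rfl)
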